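-- pv_equiv track=rewrite | github.com/dvlasits/Project-Euler | 103/103.py | checkLargerBigger
-- ===== SOURCE A (Python) =====
-- import math
--
-- def checkLargerBigger(sett):
--   here = list(sett)
--   here.sort()
--   runningTotalLower = here.pop(0)
--   runningTotalHigher = 0
--   for i in range(math.ceil((len(here)+1)/2)-1):
--     runningTotalLower+= here.pop(0)
--     runningTotalHigher+= here.pop(-1)
--     if runningTotalHigher > runningTotalLower:
--       return False
--   return True
-- ===== SOURCE B (Python) =====
-- import math
--
-- def checkLargerBigger(sett):
--     here = sorted(sett)
--     pref = [0]
--     s = 0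
--     for x in here:
--         s += x
--         pref.append(s)
--     n = len(here)
--     total = pref[n]
--     K = math.ceil(n / 2) - 1
--     return all(total - pref[n - j] <= pref[j + 1] for j in range(1, K + 1))
-- ===== Notes on version B (the rewrite author's own statement) =====
-- stated objective: alternative
-- what changed: A destructively pops elements from both ends of the sorted list carrying two running totals with an early return; B builds a prefix-sum table of the sorted list in one pass and checks all front/back comparisons with all() over index arithmetic; Pre_ excludes the empty list, on which A raises IndexError.
import Mathlib
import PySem

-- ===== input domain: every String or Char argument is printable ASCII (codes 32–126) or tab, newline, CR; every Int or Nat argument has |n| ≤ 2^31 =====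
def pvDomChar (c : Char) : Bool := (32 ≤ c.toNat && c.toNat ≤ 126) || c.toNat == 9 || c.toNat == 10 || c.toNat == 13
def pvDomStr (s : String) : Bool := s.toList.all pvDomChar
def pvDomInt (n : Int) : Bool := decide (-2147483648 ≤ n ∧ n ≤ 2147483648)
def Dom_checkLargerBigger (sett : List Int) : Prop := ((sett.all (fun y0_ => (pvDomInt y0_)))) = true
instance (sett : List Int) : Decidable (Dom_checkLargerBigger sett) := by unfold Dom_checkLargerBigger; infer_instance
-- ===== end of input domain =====

-- B replaces A's destructive two-ended pop loop with a prefix-sum table built in one pass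
-- and an all() over the compared indices (objective: alternative decomposition; return value only,
-- A mutates only its local copy of the input).

-- math.ceil(m/2) on an integer m (used by both Pythons via math.ceil)
def pvCeilHalf (m : Int) : Int := -(PySem.Int.floordiv (-m) 2)

-- ===== PORT A =====
-- the for-loop: k iterations remaining; lo/hi are the running totals
def pvALoop : Nat → List Int → Int → Int → Bool
  | 0, _, _, _ => true
  | k+1, here, lo, hi =>
    match PySem.List.pop? here 0 with
    | none => false                     -- IndexError (unreachable under Pre_)
    | some (a, here1) =>
      match PySem.List.pop? here1 with  -- pop(-1), the default
      | none => false                   -- IndexError (unreachable under Pre_)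
      | some (b, here2) =>
        if hi + b > lo + a then false else pvALoop k here2 (lo + a) (hi + b)

def checkLargerBigger (sett : List Int) : Bool :=
  let here := PySem.List.sorted sett id false
  match PySem.List.pop? here 0 with
  | none => false                       -- IndexError on the empty input (outside Pre_)
  | some (x0, here1) =>
    pvALoop (pvCeilHalf ((here1.length : Int) + 1) - 1).toNat here1 x0 0

-- ===== PORT B =====
def checkLargerBigger_alt (sett : List Int) : Bool :=
  let here := PySem.List.sorted sett id false
  -- pref[j] = sum of the j smallest elements, built in one pass with running sum s
  let pref := (here.foldl (fun (p : List Int × Int) x => (p.1 ++ [p.2 + x], p.2 + x)) ([0], 0)).1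
  let n : Int := (here.length : Int)
  let total := PySem.List.pyGetD pref n 0   -- pref[n]; n is always in range
  let K := pvCeilHalf n - 1
  (PySem.List.pyRange 1 (K + 1) 1).all (fun j =>
    decide (total - PySem.List.pyGetD pref (n - j) 0 ≤ PySem.List.pyGetD pref (j + 1) 0))

-- ===== PRECONDITION & SPEC =====
-- Pre_ excludes exactly the empty list, on which A raises IndexError (pop from empty list).
def Pre_checkLargerBigger (sett : List Int) : Prop := sett ≠ []
instance (sett : List Int) : Decidable (Pre_checkLargerBigger sett) := by unfold Pre_checkLargerBigger; infer_instance
def pvWitness_checkLargerBigger : List Int := [2, 3, 4, 5, 6]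

def Spec_checkLargerBigger (sett : List Int) (out : Bool) : Prop := out = checkLargerBigger_alt sett
instance (sett : List Int) (out : Bool) : Decidable (Spec_checkLargerBigger sett out) := by unfold Spec_checkLargerBigger; infer_instance

-- ===== CLAIM (what is proved, stated in full; the proofs are below) =====
def Claim_equal_checkLargerBigger : Prop := ∀ (sett : List Int), Dom_checkLargerBigger sett → Pre_checkLargerBigger sett → Spec_checkLargerBigger sett (checkLargerBigger sett)

-- ===== LEMMAS AND PROOFS =====

-- the prefix-sum table B builds, characterised
theorem pvFoldlPref (l acc : List Int) (c : Int) :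
    (l.foldl (fun (p : List Int × Int) x => (p.1 ++ [p.2 + x], p.2 + x)) (acc, c)).1
      = acc ++ (List.range l.length).map (fun j => c + ((l.take (j+1)).sum)) := by
  induction l generalizing acc c with
  | nil => simp
  | cons x xs ih =>
    simp only [List.foldl_cons, ih, List.length_cons, List.range_succ_eq_map,
      List.map_cons, List.map_map]
    simp [List.append_assoc, Function.comp, add_assoc]

theorem pvPrefSpec (s : List Int) :
    (s.foldl (fun (p : List Int × Int) x => (p.1 ++ [p.2 + x], p.2 + x)) ([0], 0)).1
      = (List.range (s.length + 1)).map (fun j => ((s.take j).sum : Int)) := by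
  rw [pvFoldlPref, List.range_succ_eq_map]
  simp

-- splitting a (k+1)-bounded ∀ at 0
theorem pvForallSucc (P : Nat → Prop) (k : Nat) :
    (∀ i < k + 1, P i) ↔ P 0 ∧ (∀ i < k, P (i+1)) := by
  constructor
  · exact fun h => ⟨h 0 (Nat.succ_pos _), fun i hi => h (i+1) (by omega)⟩
  · rintro ⟨h0, h⟩ i hi
    cases i with
    | zero => exact h0
    | succ j => exact h j (by omega)

-- the loop of A computes the bounded ∀ over front/back partial sums
theorem pvALoopSpec (k : Nat) (u : List Int) (lo hi : Int) (hlen : 2 * k ≤ u.length) :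
    pvALoop k u lo hi
      = decide (∀ i < k, hi + ((u.reverse.take (i+1)).sum) ≤ lo + ((u.take (i+1)).sum)) := by
  induction k generalizing u lo hi with
  | zero => simp [pvALoop]
  | succ k ih =>
    -- u has ≥ 2 elements: u = a :: m ++ [b]
    obtain ⟨a, u', rfl⟩ : ∃ a u', u = a :: u' := by
      cases u with
      | nil => exact absurd hlen (by simp)
      | cons a u' => exact ⟨a, u', rfl⟩
    obtain ⟨m, b, rfl⟩ : ∃ m b, u' = m ++ [b] := by
      rcases List.eq_nil_or_concat u' with h | ⟨m, b, h⟩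
      · subst h; exact absurd hlen (by simp; omega)
      · exact ⟨m, b, by simp [h]⟩
    have hm : 2 * k ≤ m.length := by simp at hlen ⊢; omega
    simp only [pvALoop, PySem.List.pop?_zero_cons, PySem.List.pop?_last]
    have h0 : ((a :: (m ++ [b])).reverse.take 1).sum = b ∧ (((a :: (m ++ [b])).take 1)).sum = a := by
      constructor <;> simp
    by_cases hc : hi + b > lo + a
    · simp only [hc, if_pos]
      have hnp : ¬ (∀ i < k + 1,
          hi + (((a :: (m ++ [b])).reverse.take (i+1)).sum) ≤ lo + (((a :: (m ++ [b])).take (i+1)).sum)) := by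
        intro h
        have h00 := h 0 (Nat.succ_pos _)
        rw [zero_add, h0.1, h0.2] at h00
        omega
      exact (decide_eq_false hnp).symm
    · simp only [hc, if_neg, not_false_iff]
      rw [ih m (lo + a) (hi + b) hm]
      simp only [decide_eq_decide]
      rw [pvForallSucc]
      have hshift : ∀ i < k,
          ((hi + b) + ((m.reverse.take (i+1)).sum) ≤ (lo + a) + ((m.take (i+1)).sum))
            ↔ (hi + (((a :: (m ++ [b])).reverse.take (i+1+1)).sum) ≤ lo + (((a :: (m ++ [b])).take (i+1+1)).sum)) := by
        intro i hik
        have h1 : (a :: (m ++ [b])).reverse.take (i+1+1) = b :: m.reverse.take (i+1) := by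
          have hrev : (a :: (m ++ [b])).reverse = b :: (m.reverse ++ [a]) := by simp
          rw [hrev, List.take_cons (by omega), List.take_append_of_le_length (by simp; omega)]
          norm_num
        have h2 : (a :: (m ++ [b])).take (i+1+1) = a :: (m ++ [b]).take (i+1) := by
          simp
        have h3 : ((m ++ [b]).take (i+1)) = m.take (i+1) := by
          rw [List.take_append_of_le_length (by omega)]
        rw [h1, h2, h3]
        simp
        omega
      have hb : hi + (((a :: (m ++ [b])).reverse.take (0+1)).sum) ≤ lo + (((a :: (m ++ [b])).take (0+1)).sum) := by
        simp only [zero_add, h0.1, h0.2]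
        omega
      constructor
      · intro h
        exact ⟨hb, fun i hik => (hshift i hik).1 (h i hik)⟩
      · rintro ⟨-, h⟩ i hik
        exact (hshift i hik).2 (h i hik)

theorem checkLargerBigger_main (sett : List Int) (hne : sett ≠ []) :
    checkLargerBigger sett = checkLargerBigger_alt sett := by
  have hs : PySem.List.sorted sett id false ≠ [] := by
    intro h
    have hp := PySem.List.sorted_perm (xs := sett) (key := id) (rev := false)
    rw [h] at hp
    exact hne (List.Perm.eq_nil hp.symm)
  obtain ⟨x0, t, hst⟩ : ∃ x0 t, PySem.List.sorted sett id false = x0 :: t := by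
    cases h : PySem.List.sorted sett id false with
    | nil => exact absurd h hs
    | cons a l => exact ⟨a, l, rfl⟩
  unfold checkLargerBigger checkLargerBigger_alt
  simp only [hst, PySem.List.pop?_zero_cons, pvPrefSpec]
  simp only [List.length_cons]
  have hceil : pvCeilHalf ((t.length : Int) + 1) = -((-((t.length : Int) + 1)) / 2) := by
    unfold pvCeilHalf
    rw [PySem.Int.floordiv_eq_ediv_of_pos (by norm_num)]
  push_cast
  have h2k : 2 * ((pvCeilHalf ((t.length : Int) + 1) - 1).toNat) ≤ t.length := by
    rw [hceil]; omega
  rw [pvALoopSpec _ t x0 0 h2k]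
  simp only [sub_add_cancel, PySem.List.pyRange_one]
  rw [Bool.eq_iff_iff, decide_eq_true_iff, List.all_eq_true]
  simp only [List.mem_map, List.mem_range, decide_eq_true_iff]
  have hpref : ∀ (j : Nat), j < t.length + 2 →
      PySem.List.pyGetD ((List.range (t.length + 1 + 1)).map (fun j => ((List.take j (x0 :: t)).sum))) ((j : Int)) 0
        = (List.take j (x0 :: t)).sum := by
    intro j hj
    rw [PySem.List.pyGetD_natCast]
    exact PySem.List.getD_map_range _ _ _ _ (by omega)
  have key : ∀ (i : Nat), i + 1 ≤ t.length →
      ((PySem.List.pyGetD ((List.range (t.length + 1 + 1)).map (fun j => ((List.take j (x0 :: t)).sum))) ((t.length : Int) + 1) 0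
          - PySem.List.pyGetD ((List.range (t.length + 1 + 1)).map (fun j => ((List.take j (x0 :: t)).sum))) ((t.length : Int) + 1 - (1 + (i : Int))) 0
          ≤ PySem.List.pyGetD ((List.range (t.length + 1 + 1)).map (fun j => ((List.take j (x0 :: t)).sum))) ((1 + (i : Int)) + 1) 0)
        ↔ (0 + (List.take (i + 1) t.reverse).sum ≤ x0 + (List.take (i + 1) t).sum)) := by
    intro i hi
    have e1 : ((t.length : Int) + 1) = (((t.length + 1 : Nat)) : Int) := by push_cast; ring
    have e2 : (((t.length + 1 : Nat) : Int) - (1 + (i : Int))) = (((t.length - i : Nat)) : Int) := by omega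
    have e3 : ((1 + (i : Int)) + 1) = (((i + 2 : Nat)) : Int) := by omega
    rw [e1, e2, e3, hpref _ (by omega), hpref _ (by omega), hpref _ (by omega)]
    have t1 : List.take (t.length + 1) (x0 :: t) = x0 :: t := by
      apply List.take_of_length_le; simp
    have t3 : List.take (i + 2) (x0 :: t) = x0 :: List.take (i + 1) t := by
      rw [show i + 2 = (i + 1) + 1 from rfl, List.take_succ_cons]
    have hd : t.length - i = (t.length - (i + 1)) + 1 := by omega
    have t2 : List.take (t.length - i) (x0 :: t) = x0 :: List.take (t.length - (i + 1)) t := by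
      rw [hd, List.take_succ_cons]
    have hsplit : (List.take (t.length - (i + 1)) t).sum + (List.drop (t.length - (i + 1)) t).sum = t.sum := by
      rw [← List.sum_append, List.take_append_drop]
    have hrev : (List.take (i + 1) t.reverse).sum = (List.drop (t.length - (i + 1)) t).sum := by
      rw [List.take_reverse, List.sum_reverse]
    rw [t1, t2, t3, hrev]
    simp only [List.sum_cons]
    omega
  constructor
  · intro h x hx
    obtain ⟨i, hi, rfl⟩ := hx
    have hin : i + 1 ≤ t.length := by omega
    exact (key i hin).mpr (h i hi)
  · intro h i hi
    have hin : i + 1 ≤ t.length := by omega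
    exact (key i hin).mp (h (1 + (i : Int)) ⟨i, hi, rfl⟩)

-- ===== VERDICT (by name: the statement is the Claim_ definition above) =====
theorem checkLargerBigger_spec : Claim_equal_checkLargerBigger := by
  intro sett _ hpre
  unfold Spec_checkLargerBigger
  exact checkLargerBigger_main sett hpre
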